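-- pv_equiv track=rewrite | github.com/Conceptron/DiscordAlertsTrader | real_time_exporter.py | closest_fullname_match
-- ===== SOURCE A (Python) =====
-- def closest_fullname_match(name, names_all):
--     """Match first substring in a list from a list of strings,
--     eg, name = ["Name"]
--     """
--
--     if name is None:
--         return name
--
--     candidate = [ n for n in names_all if name[0] in n.lower()]
--
--     if candidate == []:
--         "print name not matched"
--         return None
--
--     # df unique returned in order of appearence
--     # if candidate > 1, return last most recent
--     return candidate[-1]
-- ===== SOURCE B (Python) =====
-- def closest_fullname_match(name, names_all):
--     """Match first substring in a list from a list of strings,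
--     eg, name = ["Name"]
--     """
--     if name is None:
--         return name
--     for n in reversed(list(names_all)):
--         if name[0] in n.lower():
--             return n
--     return None
-- ===== Notes on version B (the rewrite author's own statement) =====
-- stated objective: simpler
-- what changed: Replaces building the full list of matching names and indexing its last element by a reverse scan that returns the first match from the end (the same element), short-circuiting without materializing the candidate list.
import Mathlib
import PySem

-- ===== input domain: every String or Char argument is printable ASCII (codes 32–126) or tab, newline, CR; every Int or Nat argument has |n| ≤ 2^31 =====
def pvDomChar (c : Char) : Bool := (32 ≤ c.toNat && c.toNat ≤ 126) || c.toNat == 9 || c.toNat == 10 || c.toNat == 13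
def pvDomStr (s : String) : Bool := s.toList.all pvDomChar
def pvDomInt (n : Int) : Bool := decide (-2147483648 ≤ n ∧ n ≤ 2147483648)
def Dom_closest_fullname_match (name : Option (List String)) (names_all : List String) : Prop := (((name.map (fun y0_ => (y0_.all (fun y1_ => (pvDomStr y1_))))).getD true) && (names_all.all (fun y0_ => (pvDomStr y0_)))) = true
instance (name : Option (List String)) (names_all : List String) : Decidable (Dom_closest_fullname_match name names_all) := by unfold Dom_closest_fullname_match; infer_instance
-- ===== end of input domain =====

-- B replaces A's "build the list of all matches, take its last element" by a reverse scan
-- returning the first match from the end (the same element); objective: simpler.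


-- ===== PORT A =====
def closest_fullname_match (name : Option (List String)) (names_all : List String) : Option String :=
  match name with
  | none => none
  | some s =>
    -- candidate = [ n for n in names_all if name[0] in n.lower()]
    let candidate := names_all.filter (fun n =>
      match PySem.List.pyGet? s 0 with          -- name[0] (none = IndexError, excluded by Pre_)
      | some key => PySem.Str.isIn key (PySem.Str.lower n)
      | none => false)
    if candidate = [] then none
    else PySem.List.pyGet? candidate (-1)        -- candidate[-1]

-- ===== PORT B =====
-- the 'for n in reversed(list(names_all)): if name[0] in n.lower(): return n' loop
def cfmLoop (key : String) : List String → Option String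
  | [] => none
  | n :: rest => if PySem.Str.isIn key (PySem.Str.lower n) then some n else cfmLoop key rest

def closest_fullname_match_alt (name : Option (List String)) (names_all : List String) : Option String :=
  match name with
  | none => none
  | some s =>
    match PySem.List.pyGet? s 0 with             -- name[0] (none = IndexError, excluded by Pre_)
    | none => none
    | some key => cfmLoop key names_all.reverse

-- ===== PRECONDITION & SPEC =====
-- Pre_ excludes exactly the inputs where A raises IndexError: name == [] while some element
-- of names_all forces evaluating name[0].
def Pre_closest_fullname_match (name : Option (List String)) (names_all : List String) : Prop :=
  name = some [] → names_all = []
instance (name : Option (List String)) (names_all : List String) : Decidable (Pre_closest_fullname_match name names_all) := by unfold Pre_closest_fullname_match; infer_instance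

def pvWitness_closest_fullname_match : Option (List String) × List String := (some ["bo"], ["Alice", "Bob jr"])

def Spec_closest_fullname_match (name : Option (List String)) (names_all : List String) (out : Option String) : Prop := out = closest_fullname_match_alt name names_all
instance (name : Option (List String)) (names_all : List String) (out : Option String) : Decidable (Spec_closest_fullname_match name names_all out) := by unfold Spec_closest_fullname_match; infer_instance

-- ===== CLAIM (what is proved, stated in full; the proofs are below) =====
def Claim_equal_closest_fullname_match : Prop := ∀ (name : Option (List String)) (names_all : List String), Dom_closest_fullname_match name names_all → Pre_closest_fullname_match name names_all → Spec_closest_fullname_match name names_all (closest_fullname_match name names_all)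

-- ===== LEMMAS AND PROOFS =====

-- last element of the filtered list = first match scanning from the end
lemma filter_last_eq_revfind (key : String) (xs : List String) :
    (if xs.filter (fun n => PySem.Str.isIn key (PySem.Str.lower n)) = [] then none
     else PySem.List.pyGet? (xs.filter (fun n => PySem.Str.isIn key (PySem.Str.lower n))) (-1))
    = cfmLoop key xs.reverse := by
  induction xs using List.reverseRecOn with
  | nil => simp [cfmLoop]
  | append_singleton ys a ih =>
    by_cases hp : PySem.Str.isIn key (PySem.Str.lower a) = true
    · simp only [List.reverse_append, List.reverse_singleton, List.singleton_append, cfmLoop,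
        hp, if_true, List.filter_append, List.filter_cons, List.filter_nil,
        PySem.List.pyGet?_neg_one, List.getLast?_concat]
      simp
    · simp only [List.filter_append, List.reverse_append, List.reverse_singleton,
        List.filter_cons, hp, Bool.false_eq_true, if_false, List.filter_nil,
        List.append_nil, List.singleton_append, cfmLoop, ih]

-- ===== VERDICT (by name: the statement is the Claim_ definition above) =====
theorem closest_fullname_match_spec : Claim_equal_closest_fullname_match := by
  intro name names_all _ hpre
  unfold Spec_closest_fullname_match closest_fullname_match closest_fullname_match_alt
  match name with
  | none => rfl
  | some [] =>
    have h := hpre rfl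
    subst h
    rfl
  | some (k :: t) =>
    simp only [PySem.List.pyGet?_zero_cons]
    exact filter_last_eq_revfind k names_all
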